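-- pv_equiv track=rewrite | github.com/ehddk6-cyber/law | qa/answering.py | _build_wrong_point
-- ===== SOURCE A (Python) =====
-- def _review_result(review: dict) -> str:
--     return str(review.get("effective_support_level") or review.get("support_level") or "indeterminate")
--
-- def _review_reason(review: dict) -> str:
--     return str(review.get("effective_support_reason") or review.get("support_reason") or "근거가 부족합니다.")
--
-- def _build_wrong_point(option_reviews: list[dict] | None) -> str:
--     if not option_reviews:
--         return "오답 포인트를 요약할 정보가 부족합니다."
--     unsupported = [review for review in option_reviews if _review_result(review) == "unsupported"]
--     if unsupported:
--         labels = ", ".join(str(review["label"]) for review in unsupported)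
--         reasons = _dedupe_texts([_review_reason(review) for review in unsupported])
--         return f"{labels}는 근거와 충돌합니다. " + " / ".join(reasons[:2])
--     indeterminate = [review for review in option_reviews if _review_result(review) == "indeterminate"]
--     if indeterminate:
--         return "근거 부족으로 오답 포인트를 확정하기 어렵습니다."
--     supported = [review for review in option_reviews if _review_result(review) == "supported"]
--     if supported:
--         return "현재 grounded 근거와 직접 충돌하는 보기나 진술은 확인되지 않았습니다."
--     return "오답 포인트를 요약할 정보가 부족합니다."
--
-- def _dedupe_texts(values: list[str]) -> list[str]:
--     seen: set[str] = set()
--     deduped: list[str] = []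
--     for value in values:
--         if not value or value in seen:
--             continue
--         seen.add(value)
--         deduped.append(value)
--     return deduped
-- ===== SOURCE B (Python) =====
-- def _review_result(review: dict) -> str:
--     return str(review.get("effective_support_level") or review.get("support_level") or "indeterminate")
--
-- def _review_reason(review: dict) -> str:
--     return str(review.get("effective_support_reason") or review.get("support_reason") or "근거가 부족합니다.")
--
-- def _build_wrong_point(option_reviews):
--     if not option_reviews:
--         return "오답 포인트를 요약할 정보가 부족합니다."
--     # single pass: collect unsupported reviews, only flags for the other buckets
--     unsupported = []
--     has_indeterminate = False
--     has_supported = False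
--     for review in option_reviews:
--         cat = _review_result(review)
--         if cat == "unsupported":
--             unsupported.append(review)
--         elif cat == "indeterminate":
--             has_indeterminate = True
--         elif cat == "supported":
--             has_supported = True
--     if unsupported:
--         labels = ", ".join(str(review["label"]) for review in unsupported)
--         reasons = [t for t in dict.fromkeys(_review_reason(r) for r in unsupported) if t]
--         return labels + "는 근거와 충돌합니다. " + " / ".join(reasons[:2])
--     if has_indeterminate:
--         return "근거 부족으로 오답 포인트를 확정하기 어렵습니다."
--     if has_supported:
--         return "현재 grounded 근거와 직접 충돌하는 보기나 진술은 확인되지 않았습니다."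
--     return "오답 포인트를 요약할 정보가 부족합니다."
-- ===== Notes on version B (the rewrite author's own statement) =====
-- stated objective: simpler
-- what changed: B replaces A's three separate filter passes over option_reviews with one fold that collects the unsupported reviews and mere boolean flags for the indeterminate/supported buckets, and dedupes reasons with dict.fromkeys instead of A's seen-set-plus-list loop.
-- outside the precondition, e.g. on _build_wrong_point([{'support_level': 'unsupported'}]): A raises KeyError, B raises KeyError
import Mathlib
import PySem

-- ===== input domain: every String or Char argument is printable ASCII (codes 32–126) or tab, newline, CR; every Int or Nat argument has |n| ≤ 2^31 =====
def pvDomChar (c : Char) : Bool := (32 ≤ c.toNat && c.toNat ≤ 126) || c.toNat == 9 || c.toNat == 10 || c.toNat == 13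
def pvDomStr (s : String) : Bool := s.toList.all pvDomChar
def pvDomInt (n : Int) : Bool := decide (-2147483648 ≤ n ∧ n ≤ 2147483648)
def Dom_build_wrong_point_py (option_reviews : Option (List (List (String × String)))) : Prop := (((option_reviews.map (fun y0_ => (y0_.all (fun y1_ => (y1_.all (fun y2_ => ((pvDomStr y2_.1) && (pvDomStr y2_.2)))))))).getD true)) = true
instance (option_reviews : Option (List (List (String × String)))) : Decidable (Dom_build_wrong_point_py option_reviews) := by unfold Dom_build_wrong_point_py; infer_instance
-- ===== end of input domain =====

-- B replaces A's three filter passes by one fold collecting the unsupported bucket plus two flags,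
-- and dedupes reasons with dict.fromkeys; objective: simpler single-pass decomposition, same values.

-- ===== PORT A =====
-- `x or y` on an Optional[str]/str chain: first operand that is a non-empty string, else the default
def pvOrD (o : Option String) (d : String) : String :=
  match o with
  | some v => if v = "" then d else v
  | none => d

def reviewResult (r : List (String × String)) : String :=
  pvOrD (PySem.Dict.get? (PySem.Dict.mk r) "effective_support_level")
    (pvOrD (PySem.Dict.get? (PySem.Dict.mk r) "support_level") "indeterminate")

def reviewReason (r : List (String × String)) : String :=
  pvOrD (PySem.Dict.get? (PySem.Dict.mk r) "effective_support_reason")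
    (pvOrD (PySem.Dict.get? (PySem.Dict.mk r) "support_reason") "근거가 부족합니다.")

-- _dedupe_texts: seen-set + output-list loop
def dedupeTexts (values : List String) : List String :=
  (values.foldl
    (fun (st : PySem.Set String × List String) v =>
      if v = "" || PySem.Set.contains st.1 v then st
      else (PySem.Set.add st.1 v, st.2 ++ [v]))
    (PySem.Set.empty, [])).2

def build_wrong_point_py (option_reviews : Option (List (List (String × String)))) : String :=
  match option_reviews with
  | none => "오답 포인트를 요약할 정보가 부족합니다."
  | some rs =>
    if rs.isEmpty then "오답 포인트를 요약할 정보가 부족합니다."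
    else
      let unsupported := rs.filter (fun r => reviewResult r == "unsupported")
      if !unsupported.isEmpty then
        -- review["label"]: total form getD "" — Pre_ guarantees the key is present (else Python raises KeyError)
        let labels := PySem.Str.join ", " (unsupported.map (fun r => PySem.Dict.getD (PySem.Dict.mk r) "label" ""))
        let reasons := dedupeTexts (unsupported.map reviewReason)
        labels ++ "는 근거와 충돌합니다. " ++ PySem.Str.join " / " (reasons.take 2)
      else
        let indeterminate := rs.filter (fun r => reviewResult r == "indeterminate")
        if !indeterminate.isEmpty then "근거 부족으로 오답 포인트를 확정하기 어렵습니다."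
        else
          let supported := rs.filter (fun r => reviewResult r == "supported")
          if !supported.isEmpty then "현재 grounded 근거와 직접 충돌하는 보기나 진술은 확인되지 않았습니다."
          else "오답 포인트를 요약할 정보가 부족합니다."

-- ===== PORT B =====
def build_wrong_point_py_alt (option_reviews : Option (List (List (String × String)))) : String :=
  match option_reviews with
  | none => "오답 포인트를 요약할 정보가 부족합니다."
  | some rs =>
    if rs.isEmpty then "오답 포인트를 요약할 정보가 부족합니다."
    else
      let st := rs.foldl
        (fun (acc : List (List (String × String)) × Bool × Bool) review =>
          let cat := reviewResult review
          if cat == "unsupported" then (acc.1 ++ [review], acc.2.1, acc.2.2)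
          else if cat == "indeterminate" then (acc.1, true, acc.2.2)
          else if cat == "supported" then (acc.1, acc.2.1, true)
          else acc)
        ([], false, false)
      if !st.1.isEmpty then
        let labels := PySem.Str.join ", " (st.1.map (fun r => PySem.Dict.getD (PySem.Dict.mk r) "label" ""))
        let reasons := (PySem.List.dedup (st.1.map reviewReason)).filter (fun t => !(t == ""))
        labels ++ "는 근거와 충돌합니다. " ++ PySem.Str.join " / " (reasons.take 2)
      else if st.2.1 then "근거 부족으로 오답 포인트를 확정하기 어렵습니다."
      else if st.2.2 then "현재 grounded 근거와 직접 충돌하는 보기나 진술은 확인되지 않았습니다."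
      else "오답 포인트를 요약할 정보가 부족합니다."

-- ===== PRECONDITION & SPEC =====
-- Pre_ excludes only inputs where Python raises KeyError: an unsupported review without a "label" key.
def Pre_build_wrong_point_py (option_reviews : Option (List (List (String × String)))) : Prop :=
  match option_reviews with
  | none => True
  | some rs => ∀ r ∈ rs, reviewResult r = "unsupported" →
      (PySem.Dict.get? (PySem.Dict.mk r) "label").isSome = true

instance (option_reviews : Option (List (List (String × String)))) : Decidable (Pre_build_wrong_point_py option_reviews) := by
  unfold Pre_build_wrong_point_py
  cases option_reviews <;> infer_instance

def pvWitness_build_wrong_point_py : (Option (List (List (String × String)))) :=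
  some [[("support_level", "unsupported"), ("label", "A")]]

def Spec_build_wrong_point_py (option_reviews : Option (List (List (String × String)))) (out : String) : Prop := out = build_wrong_point_py_alt option_reviews
instance (option_reviews : Option (List (List (String × String)))) (out : String) : Decidable (Spec_build_wrong_point_py option_reviews out) := by unfold Spec_build_wrong_point_py; infer_instance

-- ===== CLAIM (what is proved, stated in full; the proofs are below) =====
def Claim_equal_build_wrong_point_py : Prop := ∀ (option_reviews : Option (List (List (String × String)))), Dom_build_wrong_point_py option_reviews → Pre_build_wrong_point_py option_reviews → Spec_build_wrong_point_py option_reviews (build_wrong_point_py option_reviews)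

-- ===== LEMMAS AND PROOFS =====

-- reference recursion for first-occurrence dedup of non-empty strings, with a blocked set
def dspec : List String → List String → List String
  | [], _ => []
  | v :: vs, s => if v = "" || s.contains v then dspec vs s else v :: dspec vs (s ++ [v])

theorem dspec_congr (vs : List String) : ∀ (s s' : List String),
    (∀ v : String, v ≠ "" → s.contains v = s'.contains v) → dspec vs s = dspec vs s' := by
  induction vs with
  | nil => intro s s' _; rfl
  | cons v vs ih =>
    intro s s' h
    simp only [dspec]
    by_cases hv : v = ""
    · rw [if_pos (by simp [hv]), if_pos (by simp [hv])]
      exact ih _ _ h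
    · rw [h v hv]
      cases hc : s'.contains v
      · rw [if_neg (by simp [hv, hc]), if_neg (by simp [hv, hc])]
        refine congrArg _ (ih _ _ ?_)
        intro w hw
        simp only [List.contains_append, h w hw]
      · rw [if_pos (by simp [hc]), if_pos (by simp [hc])]
        exact ih _ _ h

theorem dedupe_fold_eq (vs : List String) : ∀ (seen s ded : List String),
    (∀ v : String, v ≠ "" → PySem.Set.contains seen v = s.contains v) →
    (vs.foldl
      (fun (st : PySem.Set String × List String) v =>
        if v = "" || PySem.Set.contains st.1 v then st
        else (PySem.Set.add st.1 v, st.2 ++ [v]))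
      (seen, ded)).2 = ded ++ dspec vs s := by
  induction vs with
  | nil => intro seen s ded _; simp [dspec]
  | cons v vs ih =>
    intro seen s ded h
    simp only [List.foldl_cons, dspec]
    by_cases hv : v = ""
    · rw [if_pos (by simp [hv]), if_pos (by simp [hv])]
      exact ih seen s ded h
    · have hcs : PySem.Set.contains seen v = s.contains v := h v hv
      cases hc : s.contains v
      · have hm : v ∉ seen := by simpa [PySem.Set.contains] using hcs.trans hc
        have hm' : v ∉ s := by simpa using hc
        rw [if_neg (by simp [hv, hm]), if_neg (by simp [hv, hm'])]
        have hadd : PySem.Set.add seen v = seen ++ [v] := by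
          unfold PySem.Set.add
          rw [if_neg (by simp [PySem.Set.contains, hm] : ¬ PySem.Set.contains seen v = true)]
        rw [hadd, ih (seen ++ [v]) (s ++ [v]) (ded ++ [v]) ?_]
        · simp
        · intro w hw
          have hww := h w hw
          simp only [PySem.Set.contains] at hww ⊢
          simp only [List.contains_append, hww]
      · have hm : v ∈ seen := by simpa [PySem.Set.contains] using hcs.trans hc
        have hm' : v ∈ s := by simpa using hc
        rw [if_pos (by simp [hm]), if_pos (by simp [hm'])]
        exact ih seen s ded h

theorem ofList_filter_eq (vs : List String) : ∀ (s : List String),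
    ((vs.foldl PySem.Set.add s).filter (fun t => !(t == ""))) =
      s.filter (fun t => !(t == "")) ++ dspec vs s := by
  induction vs with
  | nil => intro s; simp [dspec]
  | cons v vs ih =>
    intro s
    simp only [List.foldl_cons, dspec]
    cases hc : s.contains v
    · have hm0 : v ∉ s := by simpa using hc
      have hadd : PySem.Set.add s v = s ++ [v] := by
        unfold PySem.Set.add
        rw [if_neg (by simp [PySem.Set.contains, hm0] : ¬ PySem.Set.contains s v = true)]
      rw [hadd, ih]
      by_cases hv : v = ""
      · rw [if_pos (by simp [hv])]
        have hf : (s ++ [v]).filter (fun t => !(t == "")) = s.filter (fun t => !(t == "")) := by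
          simp [List.filter_append, hv]
        rw [hf]
        refine congrArg _ (dspec_congr vs _ _ ?_)
        intro w hw
        simp only [List.contains_append, List.contains_cons, List.contains_nil, Bool.or_false]
        have : (w == v) = false := by
          rw [hv]; exact beq_eq_false_iff_ne.mpr hw
        simp [this]
      · have hm' : v ∉ s := by simpa using hc
        rw [if_neg (by simp [hv, hm'])]
        have hf : (s ++ [v]).filter (fun t => !(t == "")) =
            s.filter (fun t => !(t == "")) ++ [v] := by
          simp [List.filter_append, hv]
        rw [hf]
        simp
    · have hm' : v ∈ s := by simpa using hc
      have hadd : PySem.Set.add s v = s := by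
        unfold PySem.Set.add
        rw [if_pos (by simp [PySem.Set.contains, hm'])]
      rw [hadd, ih, if_pos (by simp [hm'])]

theorem reasons_eq (vs : List String) :
    dedupeTexts vs = (PySem.List.dedup vs).filter (fun t => !(t == "")) := by
  unfold dedupeTexts
  rw [show PySem.Set.empty = ([] : List String) from rfl,
    dedupe_fold_eq vs [] [] [] (fun _ _ => rfl)]
  rw [PySem.List.dedup_eq_ofList, PySem.Set.ofList_eq_foldl, ofList_filter_eq vs []]
  simp

theorem group_fold_eq (rs : List (List (String × String))) :
    ∀ (u : List (List (String × String))) (bi bs : Bool),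
    rs.foldl
      (fun (acc : List (List (String × String)) × Bool × Bool) review =>
        if reviewResult review == "unsupported" then (acc.1 ++ [review], acc.2.1, acc.2.2)
        else if reviewResult review == "indeterminate" then (acc.1, true, acc.2.2)
        else if reviewResult review == "supported" then (acc.1, acc.2.1, true)
        else acc)
      (u, bi, bs) =
    (u ++ rs.filter (fun r => reviewResult r == "unsupported"),
     bi || rs.any (fun r => reviewResult r == "indeterminate"),
     bs || rs.any (fun r => reviewResult r == "supported")) := by
  induction rs with
  | nil => intro u bi bs; simp
  | cons r rs ih =>
    intro u bi bs
    simp only [List.foldl_cons, List.filter_cons, List.any_cons]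
    by_cases h1 : reviewResult r = "unsupported"
    · have e2 : (reviewResult r == "indeterminate") = false := by simp [h1]
      have e3 : (reviewResult r == "supported") = false := by simp [h1]
      rw [if_pos (by simp [h1]), ih]
      simp [h1, e2, e3]
    · have e1 : (reviewResult r == "unsupported") = false := by simp [h1]
      by_cases h2 : reviewResult r = "indeterminate"
      · have e3 : (reviewResult r == "supported") = false := by simp [h2]
        rw [if_neg (by simp [e1]), if_pos (by simp [h2]), ih]
        simp [h2, e1, e3]
      · have e2 : (reviewResult r == "indeterminate") = false := by simp [h2]
        by_cases h3 : reviewResult r = "supported"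
        · rw [if_neg (by simp [e1]), if_neg (by simp [e2]), if_pos (by simp [h3]), ih]
          simp [h3, e1, e2]
        · have e3 : (reviewResult r == "supported") = false := by simp [h3]
          rw [if_neg (by simp [e1]), if_neg (by simp [e2]), if_neg (by simp [e3]), ih]
          simp [e1, e2, e3]

theorem filter_isEmpty_eq_not_any {α : Type} (p : α → Bool) (xs : List α) :
    (xs.filter p).isEmpty = !xs.any p := by
  induction xs with
  | nil => rfl
  | cons x xs ih =>
    simp only [List.filter_cons, List.any_cons]
    cases h : p x <;> simp [ih]

-- ===== VERDICT (by name: the statement is the Claim_ definition above) =====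
theorem build_wrong_point_py_spec : Claim_equal_build_wrong_point_py := by
  intro o _ _
  unfold Spec_build_wrong_point_py build_wrong_point_py build_wrong_point_py_alt
  cases o with
  | none => rfl
  | some rs =>
    simp only
    by_cases he : rs.isEmpty
    · simp [he]
    · simp only [he, if_false, Bool.false_eq_true]
      rw [show (fun (acc : List (List (String × String)) × Bool × Bool) review =>
        let cat := reviewResult review
        if cat == "unsupported" then (acc.1 ++ [review], acc.2.1, acc.2.2)
        else if cat == "indeterminate" then (acc.1, true, acc.2.2)
        else if cat == "supported" then (acc.1, acc.2.1, true)
        else acc) = (fun (acc : List (List (String × String)) × Bool × Bool) review =>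
        if reviewResult review == "unsupported" then (acc.1 ++ [review], acc.2.1, acc.2.2)
        else if reviewResult review == "indeterminate" then (acc.1, true, acc.2.2)
        else if reviewResult review == "supported" then (acc.1, acc.2.1, true)
        else acc) from rfl]
      rw [group_fold_eq rs [] false false]
      simp only [List.nil_append, Bool.false_or]
      by_cases hu : (rs.filter (fun r => reviewResult r == "unsupported")).isEmpty
      · simp only [hu, Bool.not_true, Bool.false_eq_true, if_false]
        rw [filter_isEmpty_eq_not_any] at hu
        have hind := filter_isEmpty_eq_not_any (fun r => reviewResult r == "indeterminate") rs
        have hsup := filter_isEmpty_eq_not_any (fun r => reviewResult r == "supported") rs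
        cases hi : rs.any (fun r => reviewResult r == "indeterminate") <;>
          cases hs : rs.any (fun r => reviewResult r == "supported") <;>
            simp [hind, hsup, hi, hs]
      · simp only [hu, Bool.not_false, if_true]
        rw [reasons_eq]
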